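-- pv_equiv track=rewrite | github.com/AndreSardao/Recommeder-SemanticAgent-server-2026 | error_table_agent_semantic_v6_bundles.py | prereq_combo_tag
-- ===== SOURCE A (Python) =====
-- from typing import Any, Dict, List, Optional, Tuple
--
-- def common_prefix(strings: List[str]) -> str:
--     if not strings: return ''
--     s1, s2 = min(strings), max(strings)
--     for i,ch in enumerate(s1):
--         if i>=len(s2) or ch!=s2[i]: return s1[:i]
--     return s1
--
-- def prereq_combo_tag(prereqs: List[str]) -> str:
--     if not prereqs: return ''
--     prefix = common_prefix(prereqs)
--     if len(prefix)<5: return ''.join(prereqs)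
--     tails=[]
--     for s in sorted(prereqs):
--         two = s[-2:]
--         if not two.isdigit(): two = ''.join(ch for ch in s if ch.isdigit())[-2:]
--         tails.append(two.zfill(2))
--     return prefix + ''.join(tails)
-- ===== SOURCE B (Python) =====
-- def prereq_combo_tag(prereqs):
--     if not prereqs:
--         return ''
--     # column-wise scan: a column survives while every string has that char equal
--     matched = []
--     for chars in zip(*prereqs):
--         c = chars[0]
--         if all(ch == c for ch in chars[1:]):
--             matched.append(c)
--         else:
--             break
--     prefix = ''.join(matched)
--     if len(prefix) < 5:
--         return ''.join(prereqs)
--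
--     def tail(s):
--         two = s[-2:]
--         if not two.isdigit():
--             two = ''.join(ch for ch in s if ch.isdigit())[-2:]
--         return two.zfill(2)
--
--     return prefix + ''.join(tail(s) for s in sorted(prereqs))
-- ===== Notes on version B (the rewrite author's own statement) =====
-- stated objective: idiomatic
-- what changed: common_prefix's min/max-extremes trick (compare only the two lexicographic extremes, index loop with early return) is replaced by a column-wise zip(*prereqs) scan over all strings that breaks at the first non-uniform column, and the tail loop with an accumulator list becomes a comprehension over sorted(prereqs).
import Mathlib
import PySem

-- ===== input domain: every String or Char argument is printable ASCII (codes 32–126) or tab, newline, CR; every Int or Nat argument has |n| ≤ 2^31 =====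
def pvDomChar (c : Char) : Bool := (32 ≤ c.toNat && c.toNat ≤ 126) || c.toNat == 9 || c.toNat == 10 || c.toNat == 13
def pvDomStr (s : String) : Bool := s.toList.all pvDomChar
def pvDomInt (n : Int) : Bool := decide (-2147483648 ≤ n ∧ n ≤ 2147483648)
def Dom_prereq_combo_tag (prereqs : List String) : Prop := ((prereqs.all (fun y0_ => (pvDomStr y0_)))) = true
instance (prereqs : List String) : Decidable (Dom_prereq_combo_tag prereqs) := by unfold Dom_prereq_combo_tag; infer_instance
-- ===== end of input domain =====

-- B replaces common_prefix's min/max-extremes trick by a column-wise scan over all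
-- strings and the tail accumulator loop by a map over sorted(prereqs) (idiomatic; same cost).

-- ===== PORT A =====
-- for i,ch in enumerate(s1): if i>=len(s2) or ch!=s2[i]: return s1[:i]  /  return s1
def cpLoopA (t : List Char) (s1 s2 : List Char) (i : Nat) : List Char :=
  match t with
  | [] => s1
  | ch :: rest =>
    if i ≥ s2.length || !(s2[i]? == some ch) then s1.take i
    else cpLoopA rest s1 s2 (i + 1)

-- common_prefix: s1, s2 = min(strings), max(strings); loop over enumerate(s1)
def common_prefix (strings : List String) : List Char :=
  if strings = [] then []
  else
    let s1 := ((PySem.List.min? strings (fun x => x)).getD "").toList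
    let s2 := ((PySem.List.max? strings (fun x => x)).getD "").toList
    cpLoopA s1 s1 s2 0

-- two = s[-2:]; if not two.isdigit(): two = ''.join(ch for ch in s if ch.isdigit())[-2:]; two.zfill(2)
def tagTailA (s : List Char) : List Char :=
  let two := PySem.List.slice s (some (-2)) none
  let two :=
    if !(PySem.Chars.strIsdigit two) then
      PySem.List.slice (s.filter PySem.Chars.isdigit) (some (-2)) none
    else two
  PySem.Chars.zfill two 2

def prereq_combo_tag (prereqs : List String) : String :=
  if prereqs = [] then ""
  else
    let prefix_ := common_prefix prereqs
    if prefix_.length < 5 then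
      String.ofList (PySem.Chars.join [] (prereqs.map String.toList))
    else
      let tails := (PySem.List.sorted prereqs (fun x => x) false).foldl
        (fun acc s => acc ++ [tagTailA s.toList]) []
      String.ofList (prefix_ ++ PySem.Chars.join [] tails)

-- ===== PORT B =====
-- for chars in zip(*prereqs): c = chars[0]; if all(ch == c for ch in chars[1:]): matched.append(c) else break
def colScan (f : List Char) (rest : List (List Char)) : List Char :=
  match f with
  | [] => []
  | c :: cs =>
    if rest.all (fun r => r.head? == some c) then c :: colScan cs (rest.map List.tail)
    else []

def tagTailB (s : List Char) : List Char :=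
  let two := PySem.List.slice s (some (-2)) none
  let two :=
    if !(PySem.Chars.strIsdigit two) then
      PySem.List.slice (s.filter PySem.Chars.isdigit) (some (-2)) none
    else two
  PySem.Chars.zfill two 2

def prereq_combo_tag_alt (prereqs : List String) : String :=
  match prereqs with
  | [] => ""
  | p :: rest =>
    let prefix_ := colScan p.toList (rest.map String.toList)
    if prefix_.length < 5 then
      String.ofList (PySem.Chars.join [] ((p :: rest).map String.toList))
    else
      String.ofList (prefix_ ++ PySem.Chars.join []
        ((PySem.List.sorted (p :: rest) (fun x => x) false).map (fun s => tagTailB s.toList)))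

-- ===== PRECONDITION & SPEC =====
def Spec_prereq_combo_tag (prereqs : List String) (out : String) : Prop := out = prereq_combo_tag_alt prereqs
instance (prereqs : List String) (out : String) : Decidable (Spec_prereq_combo_tag prereqs out) := by unfold Spec_prereq_combo_tag; infer_instance

-- ===== CLAIM (what is proved, stated in full; the proofs are below) =====
def Claim_equal_prereq_combo_tag : Prop := ∀ (prereqs : List String), Dom_prereq_combo_tag prereqs → Spec_prereq_combo_tag prereqs (prereq_combo_tag prereqs)

-- ===== LEMMAS AND PROOFS =====

-- the longest common prefix of TWO char lists
def lcp2 : List Char → List Char → List Char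
  | a :: as, b :: bs => if a = b then a :: lcp2 as bs else []
  | _, _ => []

theorem lcp2_greatest : ∀ (u a b : List Char), u <+: a → u <+: b → u <+: lcp2 a b := by
  intro u
  induction u with
  | nil => intro a b _ _; simp
  | cons c cs ih =>
    intro a b ha hb
    cases a with
    | nil => simp at ha
    | cons ca as =>
      obtain ⟨rfl, ha'⟩ := List.cons_prefix_cons.mp ha
      cases b with
      | nil => simp at hb
      | cons cb bs =>
        obtain ⟨rfl, hb'⟩ := List.cons_prefix_cons.mp hb
        simp only [lcp2, if_pos]
        exact List.cons_prefix_cons.mpr ⟨rfl, ih as bs ha' hb'⟩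

-- cons ≤ cons decomposition for the lexicographic order on List Char
theorem cons_le_cons_iff' (a b : Char) (l1 l2 : List Char) :
    (a :: l1 ≤ b :: l2) ↔ (a < b ∨ (a = b ∧ l1 ≤ l2)) := by
  constructor
  · intro h
    rcases lt_trichotomy a b with hab | hab | hab
    · exact Or.inl hab
    · subst hab
      refine Or.inr ⟨rfl, ?_⟩
      by_contra hle
      have : l2 < l1 := lt_of_not_ge hle
      have : (a : Char) :: l2 < a :: l1 := List.cons_lt_cons_iff.mpr (Or.inr ⟨rfl, this⟩)
      exact absurd h (not_le_of_gt this)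
    · exfalso
      have : (b : Char) :: l2 < a :: l1 := List.cons_lt_cons_iff.mpr (Or.inl hab)
      exact absurd h (not_le_of_gt this)
  · intro h
    rcases h with h | ⟨rfl, h⟩
    · exact le_of_lt (List.cons_lt_cons_iff.mpr (Or.inl h))
    · rcases lt_or_eq_of_le h with h' | h'
      · exact le_of_lt (List.cons_lt_cons_iff.mpr (Or.inr ⟨rfl, h'⟩))
      · subst h'; exact le_rfl

theorem not_cons_le_nil (a : Char) (l : List Char) : ¬ (a :: l ≤ ([] : List Char)) := by
  intro h
  have : ([] : List Char) < a :: l := List.nil_lt_cons a l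
  exact absurd h (not_le_of_gt this)

-- anything lexicographically between a and b extends their common prefix
theorem lcp2_between : ∀ (a b x : List Char), a ≤ x → x ≤ b → lcp2 a b <+: x := by
  intro a
  induction a with
  | nil => intro b x _ _; cases b <;> simp [lcp2]
  | cons ca as ih =>
    intro b x hax hxb
    cases b with
    | nil => simp [lcp2]
    | cons cb bs =>
      simp only [lcp2]
      split_ifs with hcc
      · subst hcc
        cases x with
        | nil => exact absurd hax (not_cons_le_nil _ _)
        | cons cx xs =>
          rcases (cons_le_cons_iff' _ _ _ _).mp hax with h1 | ⟨rfl, h1⟩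
          · rcases (cons_le_cons_iff' _ _ _ _).mp hxb with h2 | ⟨rfl, _⟩
            · exact absurd (h1.trans h2) (lt_irrefl _)
            · exact absurd h1 (lt_irrefl _)
          · rcases (cons_le_cons_iff' _ _ _ _).mp hxb with h2 | ⟨_, h2⟩
            · exact absurd h2 (lt_irrefl _)
            · exact List.cons_prefix_cons.mpr ⟨rfl, ih bs xs h1 h2⟩
      · simp

-- colScan is a common prefix …
theorem colScan_prefix_first : ∀ (f : List Char) (rs : List (List Char)), colScan f rs <+: f := by
  intro f
  induction f with
  | nil => intro rs; simp [colScan]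
  | cons c cs ih =>
    intro rs
    simp only [colScan]
    split_ifs with h
    · exact List.cons_prefix_cons.mpr ⟨rfl, ih (rs.map List.tail)⟩
    · simp

theorem colScan_prefix_mem : ∀ (f : List Char) (rs : List (List Char)) (r : List Char),
    r ∈ rs → colScan f rs <+: r := by
  intro f
  induction f with
  | nil => intro rs r _; simp [colScan]
  | cons c cs ih =>
    intro rs r hr
    simp only [colScan]
    split_ifs with h
    · have hh : r.head? = some c := by
        have := List.all_eq_true.mp h r hr
        simpa using this
      cases r with
      | nil => simp at hh
      | cons cr rt =>
        have : cr = c := by simpa using hh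
        subst this
        exact List.cons_prefix_cons.mpr ⟨rfl, ih (rs.map List.tail) rt (by
          exact List.mem_map.mpr ⟨cr :: rt, hr, rfl⟩)⟩
    · simp

-- … and the greatest one
theorem colScan_greatest : ∀ (u f : List Char) (rs : List (List Char)),
    u <+: f → (∀ r ∈ rs, u <+: r) → u <+: colScan f rs := by
  intro u
  induction u with
  | nil => intro f rs _ _; simp
  | cons c cs ih =>
    intro f rs hf hrs
    cases f with
    | nil => simp at hf
    | cons cf fs =>
      obtain ⟨rfl, hf'⟩ := List.cons_prefix_cons.mp hf
      have hall : rs.all (fun r => r.head? == some c) = true := by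
        refine List.all_eq_true.mpr ?_
        intro r hr
        rcases hrs r hr with ⟨t, ht⟩
        cases r with
        | nil => simp at ht
        | cons cr rt =>
          have : c = cr := by
            have := List.cons_prefix_cons.mp ⟨t, ht⟩
            exact this.1
          simp [← this]
      simp only [colScan, hall, if_pos]
      refine List.cons_prefix_cons.mpr ⟨rfl, ih fs (rs.map List.tail) hf' ?_⟩
      intro r hr
      rcases List.mem_map.mp hr with ⟨r0, hr0, rfl⟩
      rcases hrs r0 hr0 with ⟨t, ht⟩
      cases r0 with
      | nil => simp at ht
      | cons cr rt =>
        have h1 := List.cons_prefix_cons.mp (⟨t, ht⟩ : c :: cs <+: cr :: rt)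
        simpa using h1.2

-- A's index loop computes lcp2 of the two suffixes
theorem cpLoopA_eq : ∀ (t : List Char) (s1 s2 : List Char) (i : Nat),
    s1.drop i = t → cpLoopA t s1 s2 i = s1.take i ++ lcp2 t (s2.drop i) := by
  intro t
  induction t with
  | nil =>
    intro s1 s2 i h
    have hlen : s1.length ≤ i := by
      by_contra hc
      have : s1.drop i ≠ [] := by
        simp [List.drop_eq_nil_iff]
        omega
      exact this h
    simp [cpLoopA, lcp2, List.take_of_length_le hlen]
  | cons ch rest ih =>
    intro s1 s2 i h
    simp only [cpLoopA]
    by_cases hb : i ≥ s2.length || !(s2[i]? == some ch)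
    · rw [if_pos hb]
      have hl : lcp2 (ch :: rest) (s2.drop i) = [] := by
        rcases Bool.or_eq_true_iff.mp hb with h1 | h1
        · have : s2.length ≤ i := by simpa using h1
          simp [List.drop_eq_nil_iff.mpr this, lcp2]
        · have hne : s2[i]? ≠ some ch := by simpa using h1
          cases hd : s2.drop i with
          | nil => simp [lcp2]
          | cons c2 t2 =>
            have : s2[i]? = some c2 := by
              rw [← List.head?_drop, hd]; rfl
            have hcc : ¬ ch = c2 := fun hcc => hne (by rw [this, ← hcc])
            simp [lcp2, hcc]
      rw [hl, List.append_nil]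
    · rw [if_neg hb]
      have hb' : (decide (i ≥ s2.length) || !(s2[i]? == some ch)) = false := by
        simpa using hb
      rcases Bool.or_eq_false_iff.mp hb' with ⟨ha, hc⟩
      have h1 : i < s2.length := by
        have := of_decide_eq_false ha; omega
      have h2 : s2[i]? = some ch := by
        have : (s2[i]? == some ch) = true := by
          cases hx : (s2[i]? == some ch) <;> simp [hx] at hc ⊢
        simpa using this
      have hd2 : s2.drop i = ch :: s2.drop (i + 1) := by
        cases hd : s2.drop i with
        | nil =>
          have : s2[i]? = none := by rw [← List.head?_drop, hd]; rfl
          rw [this] at h2; exact absurd h2 (by simp)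
        | cons c2 t2 =>
          have hc2 : s2[i]? = some c2 := by rw [← List.head?_drop, hd]; rfl
          have : c2 = ch := by rw [hc2] at h2; exact Option.some.inj h2
          subst this
          have : t2 = s2.drop (i + 1) := by
            have := congrArg List.tail hd
            simpa [List.tail_drop] using this.symm
          rw [this]
      have hrest : s1.drop (i + 1) = rest := by
        have := congrArg List.tail h
        simpa [List.tail_drop] using this
      have h1i : s1[i]? = some ch := by rw [← List.head?_drop, h]; rfl
      have htake : s1.take (i + 1) = s1.take i ++ [ch] := by
        rw [List.take_add_one, h1i]; rfl
      rw [ih s1 s2 (i + 1) hrest, hd2]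
      simp [lcp2, htake]

-- common_prefix of a nonempty list = lcp2 of its min and max
theorem common_prefix_eq_lcp2 (p : String) (rest : List String)
    (m M : String)
    (hm : PySem.List.min? (p :: rest) (fun x => x) = some m)
    (hM : PySem.List.max? (p :: rest) (fun x => x) = some M) :
    common_prefix (p :: rest) = lcp2 m.toList M.toList := by
  simp only [common_prefix, if_neg (List.cons_ne_nil p rest), hm, hM, Option.getD_some]
  have := cpLoopA_eq m.toList m.toList M.toList 0 (by simp)
  simpa using this

-- the column scan agrees with lcp2(min, max)
theorem colScan_eq_common_prefix (p : String) (rest : List String) :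
    common_prefix (p :: rest) = colScan p.toList (rest.map String.toList) := by
  rcases hm : PySem.List.min? (p :: rest) (fun x => x) with _ | m
  · exact absurd ((PySem.List.min?_eq_none_iff _ _).mp hm) (List.cons_ne_nil p rest)
  rcases hM : PySem.List.max? (p :: rest) (fun x => x) with _ | M
  · exact absurd ((PySem.List.max?_eq_none_iff _ _).mp hM) (List.cons_ne_nil p rest)
  rw [common_prefix_eq_lcp2 p rest m M hm hM]
  have hmMem : m ∈ p :: rest := PySem.List.min?_mem hm
  have hMMem : M ∈ p :: rest := PySem.List.max?_mem hM
  have hmin : ∀ y ∈ p :: rest, m ≤ y := fun y hy => PySem.List.min?_isMin hm y hy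
  have hmax : ∀ y ∈ p :: rest, y ≤ M := fun y hy => PySem.List.max?_isMax hM y hy
  -- lcp2 m M is a prefix of every member
  have hbetween : ∀ x ∈ p :: rest, lcp2 m.toList M.toList <+: x.toList := by
    intro x hx
    exact lcp2_between m.toList M.toList x.toList
      (String.le_iff_toList_le.mp (hmin x hx)) (String.le_iff_toList_le.mp (hmax x hx))
  -- colScan is a prefix of every member
  have hcolMem : ∀ x ∈ p :: rest, colScan p.toList (rest.map String.toList) <+: x.toList := by
    intro x hx
    rcases List.mem_cons.mp hx with rfl | hx
    · exact colScan_prefix_first _ _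
    · exact colScan_prefix_mem _ _ _ (List.mem_map.mpr ⟨x, hx, rfl⟩)
  have h1 : lcp2 m.toList M.toList <+: colScan p.toList (rest.map String.toList) :=
    colScan_greatest _ _ _ (hbetween p (List.mem_cons_self))
      (fun r hr => by
        rcases List.mem_map.mp hr with ⟨x, hx, rfl⟩
        exact hbetween x (List.mem_cons_of_mem _ hx))
  have h2 : colScan p.toList (rest.map String.toList) <+: lcp2 m.toList M.toList :=
    lcp2_greatest _ _ _ (hcolMem m hmMem) (hcolMem M hMMem)
  exact List.Sublist.antisymm h1.sublist h2.sublist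

theorem foldl_append_tails (l : List String) :
    ∀ acc : List (List Char),
      l.foldl (fun acc s => acc ++ [tagTailA s.toList]) acc
        = acc ++ l.map (fun s => tagTailB s.toList) := by
  induction l with
  | nil => intro acc; simp
  | cons x xs ih =>
    intro acc
    rw [List.foldl_cons, ih]
    simp [tagTailA, tagTailB]

-- ===== VERDICT (by name: the statement is the Claim_ definition above) =====
theorem prereq_combo_tag_spec : Claim_equal_prereq_combo_tag := by
  intro prereqs _
  unfold Spec_prereq_combo_tag
  cases prereqs with
  | nil => rfl
  | cons p rest =>
    simp only [prereq_combo_tag, prereq_combo_tag_alt, if_neg (List.cons_ne_nil p rest)]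
    rw [colScan_eq_common_prefix p rest]
    split_ifs with h
    · rfl
    · rw [foldl_append_tails]
      simp
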